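-- pv_equiv track=rewrite | github.com/shreyas-malhotra/class_cryptography | playfair.py | final_text
-- ===== SOURCE A (Python) =====
-- def final_text(text):
--     text = text.upper().replace("J", "I").replace(" ", "")
--     final = []
--
--     i = 0
--     while i < len(text):
--         char1 = text[i]
--         char2 = text[i + 1] if i + 1 < len(text) else 'X'
--         if char1 == char2:
--             final.append(char1 + 'X')
--             i += 1
--         else:
--             final.append(char1 + char2)
--             i += 2
--
--     return final
-- ===== SOURCE B (Python) =====
-- def final_text(text):
--     text = text.upper().replace("J", "I").replace(" ", "")
--     final = []
--     pending = None
--     for c in text: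
--         if pending is None:
--             pending = c
--         elif pending == c:
--             final.append(pending + 'X')
--             pending = c
--         else:
--             final.append(pending + c)
--             pending = None
--     if pending is not None:
--         final.append(pending + 'X')
--     return final
-- ===== Notes on version B (the rewrite author's own statement) =====
-- stated objective: alternative
-- what changed: Replaces the index-based while loop with lookahead (advance by 1 or 2) by a single for-loop state machine that carries one held-back character and flushes it at the end; direct iteration avoids per-step indexing and len() calls.
import Mathlib
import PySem

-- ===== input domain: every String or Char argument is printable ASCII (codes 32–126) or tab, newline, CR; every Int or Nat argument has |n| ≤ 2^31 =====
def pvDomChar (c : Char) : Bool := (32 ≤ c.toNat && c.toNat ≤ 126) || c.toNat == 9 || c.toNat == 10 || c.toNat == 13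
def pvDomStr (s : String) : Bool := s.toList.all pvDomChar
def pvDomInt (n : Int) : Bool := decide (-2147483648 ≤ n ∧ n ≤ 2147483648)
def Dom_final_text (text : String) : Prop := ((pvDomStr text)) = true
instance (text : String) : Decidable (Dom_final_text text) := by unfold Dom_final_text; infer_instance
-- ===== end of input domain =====

-- B replaces A's index loop with lookahead by a one-pass state machine carrying one held-back character; same output.

-- ===== PORT A =====
-- A's while loop over i: char1 = text[i], char2 = text[i+1] or 'X'; advance by 1 on a double, else by 2.
def finalLoopA : List Char → List String
  | [] => []
  | [c] => [String.ofList [c, 'X']]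
  | c1 :: c2 :: rest =>
      if c1 == c2 then String.ofList [c1, 'X'] :: finalLoopA (c2 :: rest)
      else String.ofList [c1, c2] :: finalLoopA rest

def final_text (text : String) : List String :=
  finalLoopA (PySem.Str.replace (PySem.Str.replace (PySem.Str.upper text) "J" "I") " " "").toList

-- ===== PORT B =====
-- B's for loop carrying (final, pending); then a final flush of pending.
def stepB (acc : List String × Option Char) (c : Char) : List String × Option Char :=
  match acc.2 with
  | none => (acc.1, some c)
  | some p =>
      if p == c then (acc.1 ++ [String.ofList [p, 'X']], some c)
      else (acc.1 ++ [String.ofList [p, c]], none)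

def final_text_alt (text : String) : List String :=
  let r := (PySem.Str.replace (PySem.Str.replace (PySem.Str.upper text) "J" "I") " " "").toList.foldl stepB ([], none)
  match r.2 with
  | none => r.1
  | some p => r.1 ++ [String.ofList [p, 'X']]

-- ===== PRECONDITION & SPEC =====
def Spec_final_text (text : String) (out : List String) : Prop := out = final_text_alt text
instance (text : String) (out : List String) : Decidable (Spec_final_text text out) := by unfold Spec_final_text; infer_instance

-- ===== CLAIM (what is proved, stated in full; the proofs are below) =====
def Claim_equal_final_text : Prop := ∀ (text : String), Dom_final_text text → Spec_final_text text (final_text text)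

-- ===== LEMMAS AND PROOFS =====
def optCons : Option Char → List Char → List Char
  | none, l => l
  | some p, l => p :: l

def finishB (r : List String × Option Char) : List String :=
  match r.2 with
  | none => r.1
  | some p => r.1 ++ [String.ofList [p, 'X']]

theorem foldB_eq (l : List Char) : ∀ (acc : List String) (pend : Option Char),
    finishB (l.foldl stepB (acc, pend)) = acc ++ finalLoopA (optCons pend l) := by
  induction l with
  | nil =>
      intro acc pend
      cases pend <;> simp [finishB, optCons, finalLoopA]
  | cons c rest ih =>
      intro acc pend
      cases pend with
      | none => simpa [stepB, optCons] using ih acc (some c)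
      | some p =>
          by_cases h : p = c
          · subst h
            simp [stepB, optCons, finalLoopA, ih (acc ++ [String.ofList [p, 'X']]) (some p)]
          · simp [stepB, optCons, finalLoopA, h, ih (acc ++ [String.ofList [p, c]]) none]

-- ===== VERDICT (by name: the statement is the Claim_ definition above) =====
theorem final_text_spec : Claim_equal_final_text := by
  intro text _
  unfold Spec_final_text final_text final_text_alt
  have := foldB_eq (PySem.Str.replace (PySem.Str.replace (PySem.Str.upper text) "J" "I") " " "").toList [] none
  simpa [finishB, optCons] using this.symm
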